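-- pv_equiv track=rewrite | github.com/miliar/Code_Jam_Webscraper | solutions_python/solutions_year11_round0_nr3/502.py | find
-- ===== SOURCE A (Python) =====
-- def find(values, mask, select=0, bits=0, next=0, add=None):
--     if add is not None:
--         select += add
--         bits = (bits | add) - (bits & add)
--         if select & mask == 0:
--             return sum(values) - select
--
--     v = len(values)
--     while next < v:
--         f = find(values, mask, select, bits, next + 1, values[next])
--         if f:
--             return f
--         next += 1
--
--     return 0
-- ===== SOURCE B (Python) =====
-- def find(values, mask, select=0, bits=0, next=0, add=None):
--     # `bits` is dead in A (never influences the result); kept for the signature.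
--     if add is not None:
--         select += add
--         if select & mask == 0:
--             return sum(values) - select
--     total = sum(values)
--     n = len(values)
--     stack = [(select, next)]
--     while stack:
--         sel, i = stack.pop()
--         if i >= n:
--             continue
--         stack.append((sel, i + 1))        # skip values[i]
--         new = sel + values[i]
--         if new & mask == 0:
--             r = total - new
--             if r:
--                 return r
--             # zero complement: A's recursive call returns 0 before its loop,
--             # so the subtree below this node is never explored
--         else:
--             stack.append((new, i + 1))    # take values[i], go deeper
--     return 0
-- ===== Notes on version B (the rewrite author's own statement) =====
-- stated objective: alternative
-- what changed: The recursive DFS with an inner while-loop of recursive calls is replaced by an iterative worklist: an explicit LIFO stack of (select, index) frames with a take/skip decomposition per index, preserving A's exact preorder and its zero-complement pruning.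
import Mathlib
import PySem

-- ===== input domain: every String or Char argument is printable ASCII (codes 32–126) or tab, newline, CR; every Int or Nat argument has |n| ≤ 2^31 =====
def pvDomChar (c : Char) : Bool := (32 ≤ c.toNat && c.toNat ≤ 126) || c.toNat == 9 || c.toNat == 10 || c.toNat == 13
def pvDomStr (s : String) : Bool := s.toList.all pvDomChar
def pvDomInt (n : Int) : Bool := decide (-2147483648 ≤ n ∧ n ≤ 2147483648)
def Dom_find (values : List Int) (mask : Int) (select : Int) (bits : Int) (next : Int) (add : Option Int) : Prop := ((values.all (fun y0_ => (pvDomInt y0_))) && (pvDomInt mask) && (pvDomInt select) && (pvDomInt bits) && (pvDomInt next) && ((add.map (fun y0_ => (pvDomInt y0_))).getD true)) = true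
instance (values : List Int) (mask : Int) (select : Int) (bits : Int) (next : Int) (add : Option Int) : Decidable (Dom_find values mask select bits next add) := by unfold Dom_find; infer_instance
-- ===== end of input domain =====

-- B replaces A's recursion by an explicit LIFO stack of (select, index) frames (take/skip
-- decomposition) preserving A's exact DFS preorder; objective: alternative structure, same cost.
-- Recursion / the worklist loop are ported with a fuel parameter proven sufficient.

-- ===== PORT A =====
mutual
-- A's recursive calls (the `add is not None` prologue)
def findGo : Nat → List Int → Int → Int → Int → Int → Option Int → Int
  | 0, _, _, _, _, _, _ => 0   -- never reached: `find` supplies sufficient fuel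
  | fuel + 1, values, mask, select, bits, next, add =>
    match add with
    | some a =>
      let select := select + a
      let bits := (PySem.Int.bor bits a) - (PySem.Int.band bits a)
      if PySem.Int.band select mask = 0 then values.sum - select
      else loopGo fuel values mask select bits next
    | none => loopGo fuel values mask select bits next

-- the `while next < v:` loop of A
def loopGo : Nat → List Int → Int → Int → Int → Int → Int
  | 0, _, _, _, _, _ => 0      -- never reached: `find` supplies sufficient fuel
  | fuel + 1, values, mask, select, bits, next =>
    if next < (values.length : Int) then
      let f := findGo fuel values mask select bits (next + 1) (some (PySem.List.pyGetD values next 0))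
      if f ≠ 0 then f else loopGo fuel values mask select bits (next + 1)
    else 0
end

def find (values : List Int) (mask : Int) (select : Int) (bits : Int) (next : Int) (add : Option Int) : Int :=
  findGo (2 * (((values.length : Int) + 1 - next).toNat) + 2) values mask select bits next add

-- ===== PORT B =====
-- weight of a stack (a bound on the number of worklist iterations, used as fuel)
def pvFrameW (len : Nat) (i : Int) : Nat := 3 ^ (((len : Int) + 1 - i).toNat)
def pvStackW (len : Nat) (st : List (Int × Int)) : Nat := (st.map (fun f => pvFrameW len f.2)).sum

-- the `while stack:` loop of Source B
def runGo : Nat → List Int → Int → Int → List (Int × Int) → Int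
  | 0, _, _, _, _ => 0         -- never reached: `find_alt` supplies sufficient fuel
  | fuel + 1, values, mask, total, st =>
    match st with
    | [] => 0
    | (sel, i) :: rest =>
      if (values.length : Int) ≤ i then runGo fuel values mask total rest
      else
        let new := sel + PySem.List.pyGetD values i 0
        if PySem.Int.band new mask = 0 then
          let r := total - new
          if r ≠ 0 then r else runGo fuel values mask total ((sel, i + 1) :: rest)
        else runGo fuel values mask total ((new, i + 1) :: (sel, i + 1) :: rest)

def find_alt (values : List Int) (mask : Int) (select : Int) (bits : Int) (next : Int) (add : Option Int) : Int :=
  match add with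
  | some a =>
    let select := select + a
    if PySem.Int.band select mask = 0 then values.sum - select
    else runGo (pvStackW values.length [(select, next)]) values mask values.sum [(select, next)]
  | none => runGo (pvStackW values.length [(select, next)]) values mask values.sum [(select, next)]

-- ===== PRECONDITION & SPEC =====
-- Pre_ excludes exactly the inputs on which Python A raises IndexError: next below
-- -len(values) while the add-branch does not return first (both programs raise there).
def Pre_find (values : List Int) (mask : Int) (select : Int) (bits : Int) (next : Int) (add : Option Int) : Prop :=
  (-(values.length : Int) ≤ next) ∨
    ((add.map (fun a => PySem.Int.band (select + a) mask == 0)).getD false = true)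
instance (values : List Int) (mask : Int) (select : Int) (bits : Int) (next : Int) (add : Option Int) : Decidable (Pre_find values mask select bits next add) := by unfold Pre_find; infer_instance

def pvWitness_find : List Int × Int × Int × Int × Int × Option Int := ([1, 2, 3], 2, 0, 0, 0, none)

def Spec_find (values : List Int) (mask : Int) (select : Int) (bits : Int) (next : Int) (add : Option Int) (out : Int) : Prop := out = find_alt values mask select bits next add
instance (values : List Int) (mask : Int) (select : Int) (bits : Int) (next : Int) (add : Option Int) (out : Int) : Decidable (Spec_find values mask select bits next add out) := by unfold Spec_find; infer_instance

-- ===== CLAIM (what is proved, stated in full; the proofs are below) =====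
def Claim_equal_find : Prop := ∀ (values : List Int) (mask : Int) (select : Int) (bits : Int) (next : Int) (add : Option Int), Dom_find values mask select bits next add → Pre_find values mask select bits next add → Spec_find values mask select bits next add (find values mask select bits next add)

-- ===== LEMMAS AND PROOFS =====

lemma pvFrameW_succ (len : Nat) (i : Int) (h : i < (len : Int)) :
    pvFrameW len i = 3 * pvFrameW len (i + 1) := by
  unfold pvFrameW
  have hk : ((len : Int) + 1 - i).toNat = ((len : Int) + 1 - (i + 1)).toNat + 1 := by omega
  rw [hk, pow_succ]; ring

lemma pvFrameW_pos (len : Nat) (i : Int) : 0 < pvFrameW len i := by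
  unfold pvFrameW; positivity

-- —— A side: fuel irrelevance and a canonical loop function ——

/-- fuel sufficient for `loopGo` started at index `i` -/
def pvNeedL (len : Nat) (i : Int) : Nat := 2 * (((len : Int) - i).toNat) + 1

/-- canonical value of A's while-loop -/
def pvL (values : List Int) (mask sel b i : Int) : Int :=
  loopGo (pvNeedL values.length i) values mask sel b i

lemma loopGo_succ (fuel : Nat) (values : List Int) (mask sel b i : Int) :
    loopGo (fuel + 1) values mask sel b i =
      if i < (values.length : Int) then
        (if findGo fuel values mask sel b (i + 1) (some (PySem.List.pyGetD values i 0)) ≠ 0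
         then findGo fuel values mask sel b (i + 1) (some (PySem.List.pyGetD values i 0))
         else loopGo fuel values mask sel b (i + 1))
      else 0 := rfl

lemma findGo_some (fuel : Nat) (values : List Int) (mask sel b n a : Int) :
    findGo (fuel + 1) values mask sel b n (some a) =
      if PySem.Int.band (sel + a) mask = 0 then values.sum - (sel + a)
      else loopGo fuel values mask (sel + a)
        (PySem.Int.bor b a - PySem.Int.band b a) n := rfl

lemma findGo_none (fuel : Nat) (values : List Int) (mask sel b n : Int) :
    findGo (fuel + 1) values mask sel b n none = loopGo fuel values mask sel b n := rfl

lemma loopGo_eq_pvL (values : List Int) (mask : Int) :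
    ∀ (fuel : Nat) (sel b i : Int), pvNeedL values.length i ≤ fuel →
      loopGo fuel values mask sel b i = pvL values mask sel b i := by
  intro fuel
  induction fuel using Nat.strong_induction_on with
  | _ fuel ih =>
    intro sel b i hf
    by_cases h : i < (values.length : Int)
    · have hk : 1 ≤ (((values.length : Int)) - i).toNat := by omega
      have hneed : pvNeedL values.length i = 2 * (((values.length : Int)) - i).toNat + 1 := rfl
      have hneed' : pvNeedL values.length (i + 1)
          = 2 * (((values.length : Int)) - i).toNat - 1 := by
        simp only [pvNeedL]; omega
      obtain ⟨f2, rfl⟩ : ∃ f2, fuel = f2 + 1 + 1 :=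
        ⟨fuel - 2, by simp only [pvNeedL] at hf; omega⟩
      rw [loopGo_succ, if_pos h, findGo_some]
      rw [ih f2 (by omega) (sel + PySem.List.pyGetD values i 0) _ (i + 1) (by omega)]
      rw [ih (f2 + 1) (by omega) sel b (i + 1) (by omega)]
      -- unfold the canonical side once in the same way
      have hR : pvL values mask sel b i =
          (if (if PySem.Int.band (sel + PySem.List.pyGetD values i 0) mask = 0
               then values.sum - (sel + PySem.List.pyGetD values i 0)
               else pvL values mask (sel + PySem.List.pyGetD values i 0)
                 (PySem.Int.bor b (PySem.List.pyGetD values i 0) -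
                  PySem.Int.band b (PySem.List.pyGetD values i 0)) (i + 1)) ≠ 0
           then (if PySem.Int.band (sel + PySem.List.pyGetD values i 0) mask = 0
                 then values.sum - (sel + PySem.List.pyGetD values i 0)
                 else pvL values mask (sel + PySem.List.pyGetD values i 0)
                   (PySem.Int.bor b (PySem.List.pyGetD values i 0) -
                    PySem.Int.band b (PySem.List.pyGetD values i 0)) (i + 1))
           else pvL values mask sel b (i + 1)) := by
        have hsplit : pvNeedL values.length i
            = (2 * (((values.length : Int)) - i).toNat - 1) + 1 + 1 := by
          simp only [pvNeedL]; omega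
        conv_lhs => rw [pvL, hsplit, loopGo_succ, if_pos h, findGo_some]
        rw [ih (2 * (((values.length : Int)) - i).toNat - 1)
              (by simp only [pvNeedL] at hf; omega) _ _ (i + 1) (by omega)]
        rw [ih (2 * (((values.length : Int)) - i).toNat - 1 + 1)
              (by simp only [pvNeedL] at hf; omega) sel b (i + 1) (by omega)]
      rw [hR]
    · obtain ⟨f1, rfl⟩ : ∃ f1, fuel = f1 + 1 := ⟨fuel - 1, by simp only [pvNeedL] at hf; omega⟩
      rw [loopGo_succ, if_neg h]
      have hsplit : pvNeedL values.length i = (pvNeedL values.length i - 1) + 1 := by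
        simp only [pvNeedL]; omega
      rw [pvL, hsplit, loopGo_succ, if_neg h]

lemma pvL_stop (values : List Int) (mask sel b i : Int) (h : ¬ i < (values.length : Int)) :
    pvL values mask sel b i = 0 := by
  have hsplit : pvNeedL values.length i = (pvNeedL values.length i - 1) + 1 := by
    simp only [pvNeedL]; omega
  rw [pvL, hsplit, loopGo_succ, if_neg h]

lemma pvL_step (values : List Int) (mask sel b i : Int) (h : i < (values.length : Int)) :
    pvL values mask sel b i =
      if (if PySem.Int.band (sel + PySem.List.pyGetD values i 0) mask = 0
          then values.sum - (sel + PySem.List.pyGetD values i 0)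
          else pvL values mask (sel + PySem.List.pyGetD values i 0)
            (PySem.Int.bor b (PySem.List.pyGetD values i 0) -
             PySem.Int.band b (PySem.List.pyGetD values i 0)) (i + 1)) ≠ 0
      then (if PySem.Int.band (sel + PySem.List.pyGetD values i 0) mask = 0
            then values.sum - (sel + PySem.List.pyGetD values i 0)
            else pvL values mask (sel + PySem.List.pyGetD values i 0)
              (PySem.Int.bor b (PySem.List.pyGetD values i 0) -
               PySem.Int.band b (PySem.List.pyGetD values i 0)) (i + 1))
      else pvL values mask sel b (i + 1) := by
  have hk : 1 ≤ (((values.length : Int)) - i).toNat := by omega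
  have hsplit : pvNeedL values.length i
      = (2 * (((values.length : Int)) - i).toNat - 1) + 1 + 1 := by
    simp only [pvNeedL]; omega
  conv_lhs => rw [pvL, hsplit, loopGo_succ, if_pos h, findGo_some]
  rw [loopGo_eq_pvL values mask (2 * (((values.length : Int)) - i).toNat - 1)
        _ _ (i + 1) (by simp only [pvNeedL]; omega)]
  rw [loopGo_eq_pvL values mask (2 * (((values.length : Int)) - i).toNat - 1 + 1)
        sel b (i + 1) (by simp only [pvNeedL]; omega)]

-- A's result never depends on `bits` (it is only carried along)
lemma pvL_bits_irrel (values : List Int) (mask : Int) :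
    ∀ (n : Nat) (sel b b' i : Int), (((values.length : Int) + 1 - i).toNat = n) →
      pvL values mask sel b i = pvL values mask sel b' i := by
  intro n
  induction n using Nat.strong_induction_on with
  | _ n ih =>
    intro sel b b' i hn
    by_cases h : i < (values.length : Int)
    · rw [pvL_step values mask sel b i h, pvL_step values mask sel b' i h]
      have hrec : pvL values mask (sel + PySem.List.pyGetD values i 0)
            (PySem.Int.bor b (PySem.List.pyGetD values i 0) -
             PySem.Int.band b (PySem.List.pyGetD values i 0)) (i + 1)
          = pvL values mask (sel + PySem.List.pyGetD values i 0)
            (PySem.Int.bor b' (PySem.List.pyGetD values i 0) -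
             PySem.Int.band b' (PySem.List.pyGetD values i 0)) (i + 1) :=
        ih (((values.length : Int) + 1 - (i + 1)).toNat) (by omega) _ _ _ (i + 1) rfl
      have htail : pvL values mask sel b (i + 1) = pvL values mask sel b' (i + 1) :=
        ih (((values.length : Int) + 1 - (i + 1)).toNat) (by omega) sel b b' (i + 1) rfl
      rw [hrec, htail]
    · rw [pvL_stop values mask sel b i h, pvL_stop values mask sel b' i h]

-- —— B side: fuel irrelevance and a canonical worklist function ——

/-- canonical value of Source B's worklist loop (with `total = sum(values)`, as Source B passes it) -/
def pvR (values : List Int) (mask : Int) (st : List (Int × Int)) : Int :=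
  runGo (pvStackW values.length st) values mask values.sum st

lemma runGo_nil (fuel : Nat) (values : List Int) (mask total : Int) :
    runGo fuel values mask total [] = 0 := by cases fuel <;> rfl

lemma runGo_cons (fuel : Nat) (values : List Int) (mask total sel i : Int)
    (rest : List (Int × Int)) :
    runGo (fuel + 1) values mask total ((sel, i) :: rest) =
      if (values.length : Int) ≤ i then runGo fuel values mask total rest
      else if PySem.Int.band (sel + PySem.List.pyGetD values i 0) mask = 0 then
        (if total - (sel + PySem.List.pyGetD values i 0) ≠ 0
         then total - (sel + PySem.List.pyGetD values i 0)
         else runGo fuel values mask total ((sel, i + 1) :: rest))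
      else runGo fuel values mask total
        ((sel + PySem.List.pyGetD values i 0, i + 1) :: (sel, i + 1) :: rest) := rfl

lemma pvStackW_cons (len : Nat) (sel i : Int) (rest : List (Int × Int)) :
    pvStackW len ((sel, i) :: rest) = pvFrameW len i + pvStackW len rest := by
  simp [pvStackW]

lemma runGo_eq_pvR (values : List Int) (mask : Int) :
    ∀ (fuel : Nat) (st : List (Int × Int)), pvStackW values.length st ≤ fuel →
      runGo fuel values mask values.sum st = pvR values mask st := by
  intro fuel
  induction fuel using Nat.strong_induction_on with
  | _ fuel ih =>
    intro st hf
    match st with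
    | [] => rw [runGo_nil]; rw [pvR, runGo_nil]
    | (sel, i) :: rest =>
      have hw := pvFrameW_pos values.length i
      have hwc := pvStackW_cons values.length sel i rest
      obtain ⟨f1, rfl⟩ : ∃ f1, fuel = f1 + 1 := ⟨fuel - 1, by omega⟩
      have hWpos : 1 ≤ pvStackW values.length ((sel, i) :: rest) := by omega
      have hsplit : pvStackW values.length ((sel, i) :: rest)
          = (pvStackW values.length ((sel, i) :: rest) - 1) + 1 := by omega
      rw [runGo_cons]
      conv_rhs => rw [pvR, hsplit, runGo_cons]
      by_cases h : (values.length : Int) ≤ i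
      · rw [if_pos h, if_pos h]
        rw [ih f1 (by omega) rest (by omega)]
        rw [ih (pvStackW values.length ((sel, i) :: rest) - 1) (by omega) rest (by omega)]
      · have hw3 := pvFrameW_succ values.length i (by omega)
        have hw1 := pvFrameW_pos values.length (i + 1)
        have hws : pvStackW values.length ((sel, i + 1) :: rest)
            = pvFrameW values.length (i + 1) + pvStackW values.length rest :=
          pvStackW_cons _ _ _ _
        have hws2 : pvStackW values.length
              ((sel + PySem.List.pyGetD values i 0, i + 1) :: (sel, i + 1) :: rest)
            = pvFrameW values.length (i + 1) +
              (pvFrameW values.length (i + 1) + pvStackW values.length rest) := by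
          rw [pvStackW_cons, pvStackW_cons]
        rw [if_neg h, if_neg h]
        by_cases hm : PySem.Int.band (sel + PySem.List.pyGetD values i 0) mask = 0
        · rw [if_pos hm, if_pos hm]
          by_cases hr : values.sum - (sel + PySem.List.pyGetD values i 0) ≠ 0
          · rw [if_pos hr, if_pos hr]
          · rw [if_neg hr, if_neg hr]
            rw [ih f1 (by omega) ((sel, i + 1) :: rest) (by omega)]
            rw [ih (pvStackW values.length ((sel, i) :: rest) - 1) (by omega)
                  ((sel, i + 1) :: rest) (by omega)]
        · rw [if_neg hm, if_neg hm]
          rw [ih f1 (by omega)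
                ((sel + PySem.List.pyGetD values i 0, i + 1) :: (sel, i + 1) :: rest) (by omega)]
          rw [ih (pvStackW values.length ((sel, i) :: rest) - 1) (by omega)
                ((sel + PySem.List.pyGetD values i 0, i + 1) :: (sel, i + 1) :: rest) (by omega)]

lemma pvR_nil (values : List Int) (mask : Int) : pvR values mask [] = 0 := by
  rw [pvR, runGo_nil]

lemma pvR_cons (values : List Int) (mask sel i : Int) (rest : List (Int × Int)) :
    pvR values mask ((sel, i) :: rest) =
      if (values.length : Int) ≤ i then pvR values mask rest
      else if PySem.Int.band (sel + PySem.List.pyGetD values i 0) mask = 0 then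
        (if values.sum - (sel + PySem.List.pyGetD values i 0) ≠ 0
         then values.sum - (sel + PySem.List.pyGetD values i 0)
         else pvR values mask ((sel, i + 1) :: rest))
      else pvR values mask
        ((sel + PySem.List.pyGetD values i 0, i + 1) :: (sel, i + 1) :: rest) := by
  have hw := pvFrameW_pos values.length i
  have hwc := pvStackW_cons values.length sel i rest
  have hsplit : pvStackW values.length ((sel, i) :: rest)
      = (pvStackW values.length ((sel, i) :: rest) - 1) + 1 := by omega
  conv_lhs => rw [pvR, hsplit, runGo_cons]
  by_cases h : (values.length : Int) ≤ i
  · rw [if_pos h, if_pos h]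
    rw [runGo_eq_pvR values mask _ rest (by omega)]
  · have hw3 := pvFrameW_succ values.length i (by omega)
    have hw1 := pvFrameW_pos values.length (i + 1)
    have hws : pvStackW values.length ((sel, i + 1) :: rest)
        = pvFrameW values.length (i + 1) + pvStackW values.length rest :=
      pvStackW_cons _ _ _ _
    have hws2 : pvStackW values.length
          ((sel + PySem.List.pyGetD values i 0, i + 1) :: (sel, i + 1) :: rest)
        = pvFrameW values.length (i + 1) +
          (pvFrameW values.length (i + 1) + pvStackW values.length rest) := by
      rw [pvStackW_cons, pvStackW_cons]
    rw [if_neg h, if_neg h]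
    by_cases hm : PySem.Int.band (sel + PySem.List.pyGetD values i 0) mask = 0
    · rw [if_pos hm, if_pos hm]
      by_cases hr : values.sum - (sel + PySem.List.pyGetD values i 0) ≠ 0
      · rw [if_pos hr, if_pos hr]
      · rw [if_neg hr, if_neg hr]
        rw [runGo_eq_pvR values mask _ ((sel, i + 1) :: rest) (by omega)]
    · rw [if_neg hm, if_neg hm]
      rw [runGo_eq_pvR values mask _
            ((sel + PySem.List.pyGetD values i 0, i + 1) :: (sel, i + 1) :: rest) (by omega)]

-- —— the correspondence: B's worklist computes the first nonzero loop-result among its frames ——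

def pvChain (values : List Int) (mask : Int) (b : Int) : List (Int × Int) → Int
  | [] => 0
  | (sel, i) :: rest =>
    if pvL values mask sel b i = 0 then pvChain values mask b rest
    else pvL values mask sel b i

lemma pvR_eq_chain (values : List Int) (mask : Int) (b : Int) :
    ∀ (n : Nat) (st : List (Int × Int)), pvStackW values.length st = n →
      pvR values mask st = pvChain values mask b st := by
  intro n
  induction n using Nat.strong_induction_on with
  | _ n ih =>
    intro st hn
    match st with
    | [] => rw [pvR_nil]; rfl
    | (sel, i) :: rest =>
      rw [pvR_cons]
      by_cases h : (values.length : Int) ≤ i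
      · -- frame exhausted: the loop-result is 0, both sides fall through to `rest`
        rw [if_pos h]
        rw [pvChain, pvL_stop values mask sel b i (by omega), if_pos rfl]
        refine ih (pvStackW values.length rest) ?_ rest rfl
        subst hn; rw [pvStackW_cons]
        have := pvFrameW_pos values.length i; omega
      · rw [if_neg h]
        have hL := pvL_step values mask sel b i (by omega)
        by_cases hm : PySem.Int.band (sel + PySem.List.pyGetD values i 0) mask = 0
        · rw [if_pos hm]; rw [if_pos hm] at hL
          by_cases hr : values.sum - (sel + PySem.List.pyGetD values i 0) ≠ 0
          · -- found: both return the complement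
            rw [if_pos hr]; rw [if_pos hr] at hL
            rw [pvChain, hL, if_neg hr]
          · -- zero complement: A continues at i+1, B pushes only the skip-frame
            rw [if_neg hr]; rw [if_neg hr] at hL
            have hrest : pvR values mask ((sel, i + 1) :: rest)
                = pvChain values mask b ((sel, i + 1) :: rest) := by
              refine ih (pvStackW values.length ((sel, i + 1) :: rest)) ?_ _ rfl
              subst hn; rw [pvStackW_cons, pvStackW_cons]
              have h3 := pvFrameW_succ values.length i (by omega)
              have := pvFrameW_pos values.length (i + 1); omega
            rw [hrest, pvChain, pvChain, hL]
        · rw [if_neg hm]; rw [if_neg hm] at hL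
          have hrec : pvR values mask
                ((sel + PySem.List.pyGetD values i 0, i + 1) :: (sel, i + 1) :: rest)
              = pvChain values mask b
                ((sel + PySem.List.pyGetD values i 0, i + 1) :: (sel, i + 1) :: rest) := by
            refine ih (pvStackW values.length
              ((sel + PySem.List.pyGetD values i 0, i + 1) :: (sel, i + 1) :: rest)) ?_ _ rfl
            subst hn; rw [pvStackW_cons, pvStackW_cons, pvStackW_cons]
            have h3 := pvFrameW_succ values.length i (by omega)
            have := pvFrameW_pos values.length (i + 1); omega
          rw [hrec]
          have hbi : pvL values mask (sel + PySem.List.pyGetD values i 0)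
                (PySem.Int.bor b (PySem.List.pyGetD values i 0) -
                 PySem.Int.band b (PySem.List.pyGetD values i 0)) (i + 1)
              = pvL values mask (sel + PySem.List.pyGetD values i 0) b (i + 1) :=
            pvL_bits_irrel values mask _ _ _ _ _ rfl
          rw [pvChain, pvChain, pvChain, hL, hbi]
          by_cases hz : pvL values mask (sel + PySem.List.pyGetD values i 0) b (i + 1) = 0
          · simp [hz]
          · simp [hz]

lemma pvR_single (values : List Int) (mask sel b i : Int) :
    pvR values mask [(sel, i)] = pvL values mask sel b i := by
  rw [pvR_eq_chain values mask b (pvStackW values.length [(sel, i)]) [(sel, i)] rfl]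
  rw [pvChain]
  by_cases hz : pvL values mask sel b i = 0
  · simp [hz, pvChain]
  · simp [hz]

lemma find_eq_pvL_none (values : List Int) (mask select bits next : Int) :
    find values mask select bits next none = pvL values mask select bits next := by
  rw [find]
  have hsplit : 2 * (((values.length : Int) + 1 - next).toNat) + 2
      = (2 * (((values.length : Int) + 1 - next).toNat) + 1) + 1 := by omega
  rw [hsplit, findGo_none]
  exact loopGo_eq_pvL values mask _ select bits next (by simp only [pvNeedL]; omega)

lemma find_eq_pvL_some (values : List Int) (mask select bits next a : Int)
    (hm : ¬ PySem.Int.band (select + a) mask = 0) :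
    find values mask select bits next (some a) =
      pvL values mask (select + a)
        (PySem.Int.bor bits a - PySem.Int.band bits a) next := by
  rw [find]
  have hsplit : 2 * (((values.length : Int) + 1 - next).toNat) + 2
      = (2 * (((values.length : Int) + 1 - next).toNat) + 1) + 1 := by omega
  rw [hsplit, findGo_some, if_neg hm]
  exact loopGo_eq_pvL values mask _ _ _ next (by simp only [pvNeedL]; omega)

-- ===== VERDICT (by name: the statement is the Claim_ definition above) =====
theorem find_spec : Claim_equal_find := by
  intro values mask select bits next add _ _
  unfold Spec_find
  match add with
  | none =>
    rw [find_eq_pvL_none, find_alt]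
    exact (pvR_single values mask select bits next).symm
  | some a =>
    rw [find_alt]
    by_cases hm : PySem.Int.band (select + a) mask = 0
    · simp only [hm, if_pos]
      rw [find]
      have hsplit : 2 * (((values.length : Int) + 1 - next).toNat) + 2
          = (2 * (((values.length : Int) + 1 - next).toNat) + 1) + 1 := by omega
      rw [hsplit, findGo_some, if_pos hm]
    · simp only [hm, if_neg, not_false_iff]
      rw [find_eq_pvL_some values mask select bits next a hm]
      exact (pvR_single values mask (select + a)
        (PySem.Int.bor bits a - PySem.Int.band bits a) next).symm
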